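-- pv_equiv track=rewrite | github.com/JonilsonRosinaldo/Blind-Auction- | main.py | transform
-- ===== SOURCE A (Python) =====
-- def transform(dict, num_list_items):
--     '''From a new ordered list of number of possessions this re-associates (pairs)
--      the names with their proper values and returns a new_dict in crescent order so
--      that it be possible to print the position of the players.'''  # I might search for a better alternative.
--     new_dict = {}
--     for num in num_list_items:
--         for nama in dict:
--             if nama not in new_dict:
--                 if num == dict[nama]:
--                     new_dict[nama] = num
--     return new_dict
-- ===== SOURCE B (Python) =====
-- def transform(dict, num_list_items):
--     # Index names by value once, then emit the bucket of each first-seen value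
--     # in num_list_items order: O(len(dict)+len(num_list_items)) instead of A's
--     # rescan of the whole dict for every number.
--     by_value = {}
--     for name, value in dict.items():
--         by_value.setdefault(value, []).append(name)
--     new_dict = {}
--     seen = set()
--     for v in num_list_items:
--         if v not in seen:
--             seen.add(v)
--             for name in by_value.get(v, []):
--                 new_dict[name] = v
--     return new_dict
-- ===== Notes on version B (the rewrite author's own statement) =====
-- stated objective: faster
-- what changed: Instead of rescanning the whole dict for every number with a not-yet-added guard, B builds a value-to-names index once, then makes a single pass over num_list_items with a seen-set, emitting each first-seen value's bucket of names.
import Mathlib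
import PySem

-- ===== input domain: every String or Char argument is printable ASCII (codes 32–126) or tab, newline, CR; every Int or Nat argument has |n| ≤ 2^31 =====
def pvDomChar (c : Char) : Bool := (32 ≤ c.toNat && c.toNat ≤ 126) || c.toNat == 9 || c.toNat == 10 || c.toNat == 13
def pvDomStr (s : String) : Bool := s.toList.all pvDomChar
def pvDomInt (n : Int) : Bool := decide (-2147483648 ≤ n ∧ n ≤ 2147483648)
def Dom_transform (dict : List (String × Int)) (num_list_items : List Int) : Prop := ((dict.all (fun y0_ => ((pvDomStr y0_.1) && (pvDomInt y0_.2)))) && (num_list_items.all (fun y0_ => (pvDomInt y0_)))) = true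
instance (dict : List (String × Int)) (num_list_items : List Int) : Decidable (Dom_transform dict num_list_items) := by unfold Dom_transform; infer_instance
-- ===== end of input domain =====

-- B replaces A's rescan of the whole dict for every number by a value→names index built
-- once plus one deduplicating pass over num_list_items (objective: faster, O(n+m) vs O(n·m)).
-- The 'dict' parameter is a Python dict, represented as an association list; both ports
-- normalize it with PySem.Dict.ofList (a no-op on duplicate-free key lists) exactly as
-- Python's dict construction does.

-- ===== PORT A =====
def transformInner (d : PySem.Dict String Int) (num : Int)
    (nd : PySem.Dict String Int) (p : String × Int) : PySem.Dict String Int :=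
  if nd.contains p.1 then nd                 -- 'if nama not in new_dict'
  else match d.get? p.1 with                 -- 'dict[nama]' (nama iterates dict, so present)
       | some v => if num == v then nd.insert p.1 num else nd
       | none => nd

def transformOuter (d : PySem.Dict String Int)
    (nd : PySem.Dict String Int) (num : Int) : PySem.Dict String Int :=
  d.items.foldl (transformInner d num) nd    -- 'for nama in dict'

def transform (dict : List (String × Int)) (num_list_items : List Int) : List (String × Int) :=
  let d := PySem.Dict.ofList dict
  (num_list_items.foldl (transformOuter d) PySem.Dict.empty).items

-- ===== PORT B =====
def transformAltStep (by_value : PySem.Dict Int (List String))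
    (st : PySem.Dict String Int × PySem.Set Int) (v : Int) :
    PySem.Dict String Int × PySem.Set Int :=
  if st.2.contains v then st                 -- 'if v not in seen' (skip branch)
  else ((by_value.getD v []).foldl (fun nd name => nd.insert name v) st.1, st.2.add v)

def transform_alt (dict : List (String × Int)) (num_list_items : List Int) : List (String × Int) :=
  let d := PySem.Dict.ofList dict
  let by_value : PySem.Dict Int (List String) :=
    d.items.foldl (fun b p => b.modify p.2 [] (fun l => l ++ [p.1])) PySem.Dict.empty
  (num_list_items.foldl (transformAltStep by_value) (PySem.Dict.empty, PySem.Set.empty)).1.items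

-- ===== PRECONDITION & SPEC =====
def Spec_transform (dict : List (String × Int)) (num_list_items : List Int) (out : List (String × Int)) : Prop := out = transform_alt dict num_list_items
instance (dict : List (String × Int)) (num_list_items : List Int) (out : List (String × Int)) : Decidable (Spec_transform dict num_list_items out) := by unfold Spec_transform; infer_instance

-- ===== CLAIM (what is proved, stated in full; the proofs are below) =====
def Claim_equal_transform : Prop := ∀ (dict : List (String × Int)) (num_list_items : List Int), Dom_transform dict num_list_items → Spec_transform dict num_list_items (transform dict num_list_items)

-- ===== LEMMAS AND PROOFS =====

-- the pairs of `items` whose value is v, in dict order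
def grp (items : List (String × Int)) (v : Int) : List (String × Int) :=
  items.filter (fun p => p.2 == v)

-- first occurrences among the numbers not already in `seen`, in order
def ded (seen : List Int) : List Int → List Int
  | [] => []
  | n :: r => if n ∈ seen then ded seen r else n :: ded (seen ++ [n]) r

-- the shared loop invariant: a name is in the accumulator iff its value was seen
def InvSeen (d : PySem.Dict String Int) (seen : List Int) (nd : PySem.Dict String Int) : Prop :=
  ∀ p ∈ d.items, nd.contains p.1 = decide (p.2 ∈ seen)

theorem pair_eq_of_fst_eq (d : PySem.Dict String Int) (hd : d.keys.Nodup)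
    {p q : String × Int} (hp : p ∈ d.items) (hq : q ∈ d.items) (h : q.1 = p.1) : q = p := by
  have h1 := PySem.Dict.get?_of_mem_items d (k := p.1) (v := p.2) hp hd
  have h2 := PySem.Dict.get?_of_mem_items d (k := q.1) (v := q.2) hq hd
  rw [h, h1] at h2
  have : q.2 = p.2 := by injection h2.symm
  exact Prod.ext h this

theorem inv_step (d : PySem.Dict String Int) (hd : d.keys.Nodup)
    (seen : List Int) (nd : PySem.Dict String Int) (num : Int)
    (hc : InvSeen d seen nd) :
    InvSeen d (seen ++ [num]) (PySem.Dict.mk (nd.items ++ grp d.items num)) := by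
  intro p hp
  have hcontains : (PySem.Dict.mk (nd.items ++ grp d.items num)).contains p.1
      = (nd.contains p.1 || (grp d.items num).any (fun q => q.1 == p.1)) := by
    simp [List.any_append, PySem.Dict.contains]
  rw [hcontains, hc p hp]
  have hany : (grp d.items num).any (fun q => q.1 == p.1) = decide (p.2 = num) := by
    by_cases h : p.2 = num
    · simp only [h, decide_true]
      have : p ∈ grp d.items num := by simp [grp, List.mem_filter, hp, h]
      exact List.any_eq_true.mpr ⟨p, this, by simp⟩
    · simp only [h, decide_false]
      rw [List.any_eq_false]
      intro q hq
      simp only [beq_iff_eq]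
      intro hq1
      have hqd : q ∈ d.items := (List.mem_filter.mp hq).1
      have hqv : q.2 = num := by
        have := (List.mem_filter.mp hq).2; simpa using this
      have : q = p := pair_eq_of_fst_eq d hd hp hqd hq1
      exact h (by rw [← this]; exact hqv)
  rw [hany]
  by_cases h1 : p.2 ∈ seen <;> by_cases h2 : p.2 = num <;> simp [h1, h2]

-- A's inner loop is a no-op when num was already seen
theorem innerA_skip (d : PySem.Dict String Int) (num : Int) (seen : List Int)
    (hnum : num ∈ seen) :
    ∀ (S : List (String × Int)) (nd : PySem.Dict String Int),
      (∀ p ∈ S, d.get? p.1 = some p.2) →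
      (∀ p ∈ S, nd.contains p.1 = decide (p.2 ∈ seen)) →
      S.foldl (transformInner d num) nd = nd := by
  intro S
  induction S with
  | nil => intro nd _ _; rfl
  | cons p S ih =>
    intro nd hget hc
    have hstep : transformInner d num nd p = nd := by
      unfold transformInner
      by_cases h : nd.contains p.1
      · simp [h]
      · have hcp := hc p (by simp)
        have hns : p.2 ∉ seen := by
          intro hmem; rw [hcp] at h; simp [hmem] at h
        have hne : num ≠ p.2 := fun he => hns (he ▸ hnum)
        simp [h, hget p (by simp), hne]
    rw [List.foldl_cons, hstep]
    exact ih nd (fun q hq => hget q (List.mem_cons_of_mem _ hq)) (fun q hq => hc q (List.mem_cons_of_mem _ hq))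

-- A's inner loop appends exactly the group of a fresh num
theorem innerA_add (d : PySem.Dict String Int) (num : Int) (seen : List Int)
    (hnum : num ∉ seen) :
    ∀ (S : List (String × Int)) (nd : PySem.Dict String Int),
      (∀ p ∈ S, d.get? p.1 = some p.2) →
      (∀ p ∈ S, nd.contains p.1 = decide (p.2 ∈ seen)) →
      (S.map Prod.fst).Nodup →
      S.foldl (transformInner d num) nd = PySem.Dict.mk (nd.items ++ grp S num) := by
  intro S
  induction S with
  | nil => intro nd _ _ _; simp [grp]
  | cons p S ih =>
    intro nd hget hc hnd
    have hcp := hc p (by simp)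
    rw [List.foldl_cons]
    by_cases hmem : p.2 ∈ seen
    · -- already present: skip, and p is not in the group (p.2 ≠ num)
      have hcontains : nd.contains p.1 = true := by rw [hcp]; simp [hmem]
      have hstep : transformInner d num nd p = nd := by unfold transformInner; simp [hcontains]
      have hne : (p.2 == num) = false := by
        simp only [beq_eq_false_iff_ne, ne_eq]
        intro h; exact hnum (h ▸ hmem)
      rw [hstep]
      have := ih nd (fun q hq => hget q (List.mem_cons_of_mem _ hq)) (fun q hq => hc q (List.mem_cons_of_mem _ hq))
        (by simpa using (List.nodup_cons.mp (by simpa using hnd)).2)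
      rw [this]
      simp [grp, hne]
    · have hcontains : nd.contains p.1 = false := by rw [hcp]; simp [hmem]
      by_cases heq : num = p.2
      · -- fresh match: insert appends (p.1, num) = p
        have hstep : transformInner d num nd p = nd.insert p.1 num := by
          unfold transformInner; simp [hcontains, hget p (by simp), heq]
        rw [hstep]
        have hitems := PySem.Dict.items_insert_of_not_contains nd (k := p.1) num hcontains
        have hfst : p.1 ∉ S.map Prod.fst := (List.nodup_cons.mp (by simpa using hnd)).1
        have hc' : ∀ q ∈ S, (nd.insert p.1 num).contains q.1 = decide (q.2 ∈ seen) := by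
          intro q hq
          rw [PySem.Dict.contains_insert]
          have hne : (q.1 == p.1) = false := by
            simp only [beq_eq_false_iff_ne, ne_eq]
            intro h; exact hfst (by rw [← h]; exact List.mem_map_of_mem hq)
          rw [hne, Bool.false_or]
          exact hc q (List.mem_cons_of_mem _ hq)
        have := ih (nd.insert p.1 num) (fun q hq => hget q (List.mem_cons_of_mem _ hq)) hc'
          (by simpa using (List.nodup_cons.mp (by simpa using hnd)).2)
        rw [this, hitems]
        have hb : (p.2 == num) = true := by simp [heq]
        simp [grp, List.append_assoc, heq]
      · -- fresh non-match: skip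
        have hstep : transformInner d num nd p = nd := by
          unfold transformInner
          simp only [hcontains, Bool.false_eq_true, if_false, hget p (by simp)]
          simp [heq]
        have hne : (p.2 == num) = false := by
          simp only [beq_eq_false_iff_ne, ne_eq]
          intro h; exact heq h.symm
        rw [hstep]
        have := ih nd (fun q hq => hget q (List.mem_cons_of_mem _ hq)) (fun q hq => hc q (List.mem_cons_of_mem _ hq))
          (by simpa using (List.nodup_cons.mp (by simpa using hnd)).2)
        rw [this]
        simp [grp, hne]

theorem keys_eq_map_fst (d : PySem.Dict String Int) : d.keys = d.items.map Prod.fst := by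
  simp [PySem.Dict.keys]

-- A's outer loop, characterized
theorem lemA (d : PySem.Dict String Int) (hd : d.keys.Nodup) :
    ∀ (nums : List Int) (seen : List Int) (nd : PySem.Dict String Int),
      InvSeen d seen nd →
      (nums.foldl (transformOuter d) nd).items = nd.items ++ (ded seen nums).flatMap (grp d.items) := by
  intro nums
  induction nums with
  | nil => intro seen nd _; simp [ded]
  | cons num rest ih =>
    intro seen nd hc
    have hget : ∀ p ∈ d.items, d.get? p.1 = some p.2 := fun p hp =>
      PySem.Dict.get?_of_mem_items d hp hd
    rw [List.foldl_cons]
    by_cases hmem : num ∈ seen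
    · have : transformOuter d nd num = nd :=
        innerA_skip d num seen hmem d.items nd hget hc
      rw [this, ded, if_pos hmem]
      exact ih seen nd hc
    · have hnodup : (d.items.map Prod.fst).Nodup := by rw [← keys_eq_map_fst]; exact hd
      have : transformOuter d nd num = PySem.Dict.mk (nd.items ++ grp d.items num) :=
        innerA_add d num seen hmem d.items nd hget hc hnodup
      rw [this, ded, if_neg hmem]
      rw [ih (seen ++ [num]) _ (inv_step d hd seen nd num hc)]
      simp [List.flatMap_cons, List.append_assoc]

-- B's bucket index: the names of each value, in dict order
theorem by_value_getD (d : PySem.Dict String Int) (v : Int) :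
    (d.items.foldl (fun b p => b.modify p.2 [] (fun l => l ++ [p.1]))
      (PySem.Dict.empty : PySem.Dict Int (List String))).getD v []
    = (grp d.items v).map Prod.fst := by
  have hmap : d.items.foldl (fun b p => b.modify p.2 [] (fun l => l ++ [p.1]))
      (PySem.Dict.empty : PySem.Dict Int (List String))
      = (d.items.map (fun p => (p.2, p.1))).foldl
          (fun b q => b.modify q.1 [] (fun l => l ++ [q.2])) PySem.Dict.empty := by
    rw [List.foldl_map]
  rw [hmap, PySem.Dict.getD_foldl_modify_append]
  simp [grp, List.filter_map, List.map_map, Function.comp_def, PySem.Dict.getD_empty]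

-- B's inner loop appends exactly the group of a fresh v
theorem innerB (d : PySem.Dict String Int) (hd : d.keys.Nodup) (v : Int) (seen : List Int)
    (hv : v ∉ seen) (nd : PySem.Dict String Int) (hc : InvSeen d seen nd) :
    ((grp d.items v).map Prod.fst).foldl (fun nd name => nd.insert name v) nd
      = PySem.Dict.mk (nd.items ++ grp d.items v) := by
  rw [List.foldl_map]
  have hfresh : ∀ p ∈ grp d.items v, nd.contains p.1 = false := by
    intro p hp
    have hpd : p ∈ d.items := (List.mem_filter.mp hp).1
    have hpv : p.2 = v := by have := (List.mem_filter.mp hp).2; simpa using this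
    rw [hc p hpd]
    simp [hpv, hv]
  have hnodup : ((grp d.items v).map Prod.fst).Nodup := by
    have hsub : (grp d.items v).Sublist d.items := List.filter_sublist (l := d.items)
    have : ((grp d.items v).map Prod.fst).Sublist (d.items.map Prod.fst) :=
      List.Sublist.map Prod.fst hsub
    exact List.Nodup.sublist this (by rw [← keys_eq_map_fst]; exact hd)
  have := PySem.Dict.items_foldl_insert_fresh (grp d.items v) Prod.fst (fun _ => v) nd hfresh hnodup
  have hmapeq : (grp d.items v).map (fun p => (p.1, v)) = grp d.items v := by
    have : ∀ p ∈ grp d.items v, (p.1, v) = p := by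
      intro p hp
      have hpv : p.2 = v := by have := (List.mem_filter.mp hp).2; simpa using this
      exact Prod.ext rfl hpv.symm
    calc (grp d.items v).map (fun p => (p.1, v)) = (grp d.items v).map id :=
          List.map_congr_left this
      _ = grp d.items v := List.map_id _
  apply PySem.Dict.ext
  rw [this, hmapeq]

-- B's outer loop, characterized
theorem lemB (d : PySem.Dict String Int) (hd : d.keys.Nodup)
    (by_value : PySem.Dict Int (List String))
    (hb : ∀ v, by_value.getD v [] = (grp d.items v).map Prod.fst) :
    ∀ (nums : List Int) (seen : List Int) (nd : PySem.Dict String Int),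
      InvSeen d seen nd →
      ((nums.foldl (transformAltStep by_value) (nd, seen)).1).items
        = nd.items ++ (ded seen nums).flatMap (grp d.items) := by
  intro nums
  induction nums with
  | nil => intro seen nd _; simp [ded]
  | cons v rest ih =>
    intro seen nd hc
    rw [List.foldl_cons]
    by_cases hmem : v ∈ seen
    · have hcon : (PySem.Set.contains (seen : PySem.Set Int) v) = true := by
        simp [PySem.Set.contains, hmem]
      have hstep : transformAltStep by_value (nd, seen) v = (nd, seen) := by
        unfold transformAltStep; rw [hcon]; simp
      rw [hstep, ded, if_pos hmem]
      exact ih seen nd hc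
    · have hcon : (PySem.Set.contains (seen : PySem.Set Int) v) = false := by
        simp [PySem.Set.contains, hmem]
      have hadd : PySem.Set.add (seen : PySem.Set Int) v = seen ++ [v] := by
        simp [PySem.Set.add, PySem.Set.contains, hmem]
      have hstep : transformAltStep by_value (nd, seen) v
          = (PySem.Dict.mk (nd.items ++ grp d.items v), seen ++ [v]) := by
        unfold transformAltStep
        rw [hcon]
        simp only [Bool.false_eq_true, if_false]
        rw [hb v, hadd, innerB d hd v seen hmem nd hc]
      rw [hstep, ded, if_neg hmem]
      rw [ih (seen ++ [v]) _ (inv_step d hd seen nd v hc)]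
      simp [List.flatMap_cons, List.append_assoc]

theorem inv_empty (d : PySem.Dict String Int) : InvSeen d [] PySem.Dict.empty := by
  intro p _
  simp [PySem.Dict.contains_empty]

-- ===== VERDICT (by name: the statement is the Claim_ definition above) =====
theorem transform_spec : Claim_equal_transform := by
  intro dict num_list_items _
  unfold Spec_transform transform transform_alt
  dsimp only
  have hd := PySem.Dict.nodup_keys_ofList dict
  rw [lemA (PySem.Dict.ofList dict) hd num_list_items [] PySem.Dict.empty
        (inv_empty _),
      show (PySem.Set.empty : PySem.Set Int) = ([] : List Int) from rfl,
      lemB (PySem.Dict.ofList dict) hd _ (by_value_getD (PySem.Dict.ofList dict))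
        num_list_items ([] : List Int) PySem.Dict.empty (inv_empty _)]
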